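-- pv_equiv track=rewrite | github.com/DhirajLERO/CRT-AI-NLP | myutils.py | tok
-- ===== SOURCE A (Python) =====
-- def tok(text):
--     misc = []
--     sent = []
--     curMisc = []
--     curWord = ''
--     prevCat = 'w'
--     for char in text:
--         if char == ' ':
--             if curWord != '':
--                 sent.append(curWord)
--                 misc.append(curMisc)
--                 curWord = ''
--                 curMisc = []
--             curMisc.append(char)
--             prevCat = 'w'
--         else:
--             if prevCat == 'o' or curWord == '':
--                 curWord += char
--             else:
--                 sent.append(curWord)
--                 misc.append(curMisc)
--                 curWord = char
--                 curMisc = []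
--             prevCat = 'o'
--     if curWord != '':
--         sent.append(curWord)
--         misc.append(curMisc)
--     return sent, misc
-- ===== SOURCE B (Python) =====
-- def tok(text):
--     sent, misc = [], []
--     i, n = 0, len(text)
--     while i < n:
--         j = i
--         while j < n and text[j] == ' ':
--             j += 1
--         k = j
--         while k < n and text[k] != ' ':
--             k += 1
--         if k > j:
--             sent.append(text[j:k])
--             misc.append([' '] * (j - i))
--         i = k
--     return sent, misc
-- ===== Notes on version B (the rewrite author's own statement) =====
-- stated objective: simpler
-- what changed: Replaces the char-by-char state machine with flag/accumulator variables by a run scanner: advance over each space run then each word run with inner index loops, slicing the word out and emitting [' ']*spaces in one step.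
import Mathlib
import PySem

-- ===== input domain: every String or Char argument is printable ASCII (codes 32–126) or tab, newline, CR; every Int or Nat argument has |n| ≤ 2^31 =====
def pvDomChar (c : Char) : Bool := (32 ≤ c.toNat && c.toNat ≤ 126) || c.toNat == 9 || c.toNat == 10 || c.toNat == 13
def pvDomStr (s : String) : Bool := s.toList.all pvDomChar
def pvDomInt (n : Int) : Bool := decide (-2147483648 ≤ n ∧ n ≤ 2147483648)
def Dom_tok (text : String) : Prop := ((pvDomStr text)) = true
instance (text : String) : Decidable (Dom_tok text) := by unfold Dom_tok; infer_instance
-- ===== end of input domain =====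

-- B replaces A's char-by-char state machine by a run scanner (space run, then word run); return value only, no mutation.

-- ===== PORT A =====
-- state: (sent, misc, curMisc, curWord, prevCat); words carried as List Char, converted with String.mk on flush
structure TokSt where
  sent : List String
  misc : List (List String)
  curMisc : List String
  curWord : List Char
  prevCat : String
deriving Repr

def tokStep (st : TokSt) (c : Char) : TokSt :=
  if c == ' ' then
    let st :=
      if st.curWord ≠ [] then
        { st with sent := st.sent ++ [String.mk st.curWord],
                  misc := st.misc ++ [st.curMisc],
                  curWord := [], curMisc := [] }
      else st
    { st with curMisc := st.curMisc ++ [String.mk [c]], prevCat := "w" }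
  else
    if st.prevCat == "o" || st.curWord == [] then
      { st with curWord := st.curWord ++ [c], prevCat := "o" }
    else
      { st with sent := st.sent ++ [String.mk st.curWord],
                misc := st.misc ++ [st.curMisc],
                curWord := [c], curMisc := [], prevCat := "o" }

def tok (text : String) : List String × List (List String) :=
  let st := text.toList.foldl tokStep ⟨[], [], [], [], "w"⟩
  if st.curWord ≠ [] then (st.sent ++ [String.mk st.curWord], st.misc ++ [st.curMisc])
  else (st.sent, st.misc)

-- ===== PORT B =====
-- the two inner index loops (advance over spaces / over the word) become takeWhile/dropWhile; exact there
def tokAltGo (cs : List Char) : List String × List (List String) :=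
  let sp := cs.takeWhile (· == ' ')
  let rest := cs.dropWhile (· == ' ')
  match h : rest with
  | [] => ([], [])
  | c :: cs' =>
    let w := rest.takeWhile (· != ' ')
    let rest2 := rest.dropWhile (· != ' ')
    let r := tokAltGo rest2
    (String.mk w :: r.1, List.replicate sp.length " " :: r.2)
termination_by cs.length
decreasing_by
  have h' : List.dropWhile (fun x => x == ' ') cs = c :: cs' := h
  have hne : List.dropWhile (fun x => x == ' ') cs ≠ [] := by simp [h']
  have hc : ¬(c = ' ') := by
    have hh := List.head_dropWhile_not (p := (fun x => x == ' ')) (l := cs) hne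
    have : (List.dropWhile (fun x => x == ' ') cs).head hne = c := by
      simp [h']
    rw [this] at hh; simpa using hh
  show (List.dropWhile (fun x => x != ' ') (List.dropWhile (fun x => x == ' ') cs)).length < cs.length
  have he : List.dropWhile (fun x => x != ' ') (List.dropWhile (fun x => x == ' ') cs)
      = List.dropWhile (fun x => x != ' ') cs' := by
    rw [h']; simp [List.dropWhile_cons, hc]
  have h4 := List.length_dropWhile_le (p := fun x => x != ' ') (l := cs')
  have h1 := List.length_dropWhile_le (p := fun x => x == ' ') (l := cs)
  rw [h'] at h1
  simp at h1
  rw [he]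
  omega
def tok_alt (text : String) : List String × List (List String) := tokAltGo text.toList

-- ===== PRECONDITION & SPEC =====
def Spec_tok (text : String) (out : List String × List (List String)) : Prop := out = tok_alt text
instance (text : String) (out : List String × List (List String)) : Decidable (Spec_tok text out) := by unfold Spec_tok; infer_instance

-- ===== CLAIM (what is proved, stated in full; the proofs are below) =====
def Claim_equal_tok : Prop := ∀ (text : String), Dom_tok text → Spec_tok text (tok text)

-- ===== LEMMAS AND PROOFS =====

def tokFin (st : TokSt) : List String × List (List String) :=
  if st.curWord ≠ [] then (st.sent ++ [String.mk st.curWord], st.misc ++ [st.curMisc])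
  else (st.sent, st.misc)

theorem tok_eq_fin (text : String) :
    tok text = tokFin (text.toList.foldl tokStep ⟨[], [], [], [], "w"⟩) := rfl

theorem dropWhile_spaces (k : ℕ) (l : List Char) :
    List.dropWhile (fun x => x == ' ') (List.replicate k ' ' ++ l)
      = List.dropWhile (fun x => x == ' ') l := by
  induction k with
  | zero => simp
  | succ k ih => simpa [List.replicate_succ] using ih

theorem takeWhile_spaces (k : ℕ) (l : List Char) :
    List.takeWhile (fun x => x == ' ') (List.replicate k ' ' ++ l)
      = List.replicate k ' ' ++ List.takeWhile (fun x => x == ' ') l := by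
  induction k with
  | zero => simp
  | succ k ih => simpa [List.replicate_succ] using ih

theorem word_split (w rest : List Char) (h2 : ∀ a ∈ w, a ≠ ' ')
    (hr : rest = [] ∨ ∃ cs, rest = ' ' :: cs) :
    List.takeWhile (fun x => x != ' ') (w ++ rest) = w ∧
      List.dropWhile (fun x => x != ' ') (w ++ rest) = rest := by
  induction w with
  | nil =>
    rcases hr with rfl | ⟨cs, rfl⟩ <;> simp
  | cons a w ih =>
    have ha : a ≠ ' ' := h2 a (by simp)
    have hih := ih (fun b hb => h2 b (by simp [hb]))
    simp [ha, hih.1, hih.2]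

theorem tokAlt_nil : tokAltGo [] = ([], []) := by
  rw [tokAltGo]; simp

theorem tokAlt_spaces (k : ℕ) : tokAltGo (List.replicate k ' ') = ([], []) := by
  have hd : List.dropWhile (fun x => x == ' ') (List.replicate k ' ') = [] := by
    simpa using dropWhile_spaces k ([] : List Char)
  rw [tokAltGo]
  split
  · rfl
  · next c cs' heq => rw [hd] at heq; cases heq

theorem tokAlt_step (k : ℕ) (w rest : List Char) (hw : w ≠ [])
    (h2 : ∀ a ∈ w, a ≠ ' ') (hr : rest = [] ∨ ∃ cs, rest = ' ' :: cs) :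
    tokAltGo (List.replicate k ' ' ++ w ++ rest)
      = (String.mk w :: (tokAltGo rest).1,
         List.replicate k " " :: (tokAltGo rest).2) := by
  obtain ⟨c, w', rfl⟩ : ∃ c w', w = c :: w' := by
    cases w with
    | nil => exact absurd rfl hw
    | cons c w' => exact ⟨c, w', rfl⟩
  have hc : c ≠ ' ' := h2 c (by simp)
  have hdrop : List.dropWhile (fun x => x == ' ')
      (List.replicate k ' ' ++ (c :: w') ++ rest) = c :: (w' ++ rest) := by
    rw [List.append_assoc, dropWhile_spaces]
    simp [hc]
  have htake : List.takeWhile (fun x => x == ' ')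
      (List.replicate k ' ' ++ (c :: w') ++ rest) = List.replicate k ' ' := by
    rw [List.append_assoc, takeWhile_spaces]
    simp [hc]
  have hws := word_split (c :: w') rest h2 hr
  rw [tokAltGo]
  simp only [htake, hdrop]
  have ht1 : List.takeWhile (fun x => x != ' ') (c :: (w' ++ rest)) = c :: w' := by
    simpa using hws.1
  have ht2 : List.dropWhile (fun x => x != ' ') (c :: (w' ++ rest)) = rest := by
    simpa using hws.2
  split
  · next heq => rw [hdrop] at heq; cases heq
  · next c1 cs1 heq => simp [ht1, ht2]

theorem tok_loop (cs : List Char) (st : TokSt)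
    (h1 : ∀ a ∈ st.curMisc, a = " ")
    (h2 : ∀ a ∈ st.curWord, a ≠ ' ')
    (h3 : st.prevCat = "w" → st.curWord = [])
    (h4 : st.prevCat = "w" ∨ st.prevCat = "o") :
    tokFin (cs.foldl tokStep st)
      = (st.sent ++ (tokAltGo (List.replicate st.curMisc.length ' ' ++ st.curWord ++ cs)).1,
         st.misc ++ (tokAltGo (List.replicate st.curMisc.length ' ' ++ st.curWord ++ cs)).2) := by
  induction cs generalizing st with
  | nil =>
    simp only [List.foldl_nil]
    by_cases hw : st.curWord = []
    · simp [tokFin, hw, tokAlt_spaces]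
    · obtain ⟨k, hk⟩ : ∃ k, st.curMisc = List.replicate k " " :=
        ⟨_, List.eq_replicate_of_mem h1⟩
      have hkl : st.curMisc.length = k := by rw [hk]; simp
      have hstep := tokAlt_step st.curMisc.length st.curWord [] hw h2 (Or.inl rfl)
      rw [List.append_nil] at hstep
      rw [List.append_nil, hstep]
      simp [tokFin, hw, tokAlt_nil, hk]
  | cons c cs ih =>
    rw [List.foldl_cons]
    by_cases hc : c = ' '
    · subst hc
      by_cases hw : st.curWord = []
      · have hstep : tokStep st ' '
            = { st with curMisc := st.curMisc ++ [String.mk [' ']], prevCat := "w" } := by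
          simp [tokStep, hw]
        rw [hstep]
        rw [ih { st with curMisc := st.curMisc ++ [String.mk [' ']], prevCat := "w" }
              (by intro a ha
                  rcases List.mem_append.1 ha with h | h
                  · exact h1 a h
                  · simpa using h)
              (by exact h2) (fun _ => hw) (Or.inl rfl)]
        simp [hw, List.replicate_succ', List.append_assoc]
      · obtain ⟨k, hk⟩ : ∃ k, st.curMisc = List.replicate k " " :=
          ⟨_, List.eq_replicate_of_mem h1⟩
        have hkl : st.curMisc.length = k := by rw [hk]; simp
        have hstep : tokStep st ' '
            = ⟨st.sent ++ [String.mk st.curWord], st.misc ++ [st.curMisc],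
               [String.mk [' ']], [], "w"⟩ := by
          simp [tokStep, hw]
        rw [hstep]
        rw [ih ⟨st.sent ++ [String.mk st.curWord], st.misc ++ [st.curMisc],
               [String.mk [' ']], [], "w"⟩
              (by intro a ha; simpa using ha) (by simp) (fun _ => rfl) (Or.inl rfl)]
        rw [tokAlt_step st.curMisc.length st.curWord (' ' :: cs) hw h2 (Or.inr ⟨cs, rfl⟩)]
        simp [hk]
    · have hstep : tokStep st c
          = { st with curWord := st.curWord ++ [c], prevCat := "o" } := by
        simp only [tokStep]
        rw [if_neg (by simpa using hc)]
        rw [if_pos]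
        rcases h4 with h | h
        · simp [h3 h]
        · simp [h]
      rw [hstep]
      rw [ih { st with curWord := st.curWord ++ [c], prevCat := "o" }
            (by exact h1)
            (by intro a ha
                rcases List.mem_append.1 ha with h | h
                · exact h2 a h
                · simp at h; subst h; exact hc)
            (by intro h; simp at h) (Or.inr rfl)]
      simp [List.append_assoc]

-- ===== VERDICT (by name: the statement is the Claim_ definition above) =====
theorem tok_spec : Claim_equal_tok := by
  intro text _
  show tok text = tok_alt text
  rw [tok_eq_fin]
  rw [tok_loop text.toList ⟨[], [], [], [], "w"⟩ (by simp) (by simp) (fun _ => rfl) (Or.inl rfl)]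
  simp [tok_alt]
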